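-- pv_equiv track=rewrite | github.com/vinchinzu/euler | python/782/brute_comp3.py | compute_min_comp_block
-- ===== SOURCE A (Python) =====
-- def compute_min_comp_block(n):
--     """Minimum complexity for each k using block construction."""
--     best = [999] * (n*n + 1)
--     best[0] = 1
--     best[n*n] = 1
--
--     for w1 in range(n+1):
--         for w2 in range(n+1):
--             for a in range(n+1):
--                 k = a * w1 + (n - a) * w2
--                 if k < 0 or k > n*n:
--                     continue
--
--                 # Determine distinct patterns
--                 patterns = set()
--
--                 # Row types
--                 R1 = (1,) * w1 + (0,) * (n - w1)
--                 R2 = (1,) * w2 + (0,) * (n - w2)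
--
--                 if a > 0:
--                     patterns.add(R1)
--                 if n - a > 0:
--                     patterns.add(R2)
--
--                 # Column types (block arrangement: first a rows R1, rest R2)
--                 w_lo = min(w1, w2)
--                 w_hi = max(w1, w2)
--
--                 # Cols 0..w_lo-1: all 1s
--                 if w_lo > 0:
--                     patterns.add((1,)*n)
--                 # Cols w_hi..n-1: all 0s
--                 if w_hi < n:
--                     patterns.add((0,)*n)
--
--                 # Cols w_lo..w_hi-1: mixed
--                 if w1 > w2:
--                     # R1 has 1, R2 has 0 -> col = (1^a, 0^{n-a})
--                     if w_lo < w_hi: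
--                         patterns.add((1,)*a + (0,)*(n-a))
--                 elif w1 < w2:
--                     # R1 has 0, R2 has 1 -> col = (0^a, 1^{n-a})
--                     if w_lo < w_hi:
--                         patterns.add((0,)*a + (1,)*(n-a))
--
--                 comp = len(patterns)
--                 best[k] = min(best[k], comp)
--
--     return best
-- ===== SOURCE B (Python) =====
-- def compute_min_comp_block(n):
--     """Minimum complexity for each k using block construction.
--
--     Different algorithm than the brute triple enumeration with tuple sets:
--     the pattern count of a block arrangement has a closed form, so
--     - every arrangement with a single row weight w (w1 == w2, or a in {0, n})
--       contributes min candidate 1 (w in {0, n}) or 3 at k = n*w: one O(n) pass;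
--     - for two distinct row weights only the w1 > w2 arrangements matter (an
--       arrangement with w1 < w2 is dominated by its (w2, w1, n-a) counterpart,
--       which has the same k and a pattern count at most as large), and its
--       count is base + (0 if a coincides with w1 or w2 else 1) with
--       base = 2 + 2*(0 < w2 and w1 < n), computed once per pair.
--     """
--     if n == 0:
--         return [0]
--     best = [999] * (n * n + 1)
--     best[0] = 1
--     best[n * n] = 1
--     for w in range(n + 1):
--         c = 1 if w == 0 or w == n else 3
--         if c < best[n * w]:
--             best[n * w] = c
--     for w1 in range(1, n + 1):
--         for w2 in range(w1):
--             base = 2 + 2 * (0 < w2 and w1 < n)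
--             d = w1 - w2
--             for a in range(1, n):
--                 c = base if a == w1 or a == w2 else base + 1
--                 k = n * w2 + a * d
--                 if c < best[k]:
--                     best[k] = c
--     return best
-- ===== Notes on version B (the rewrite author's own statement) =====
-- stated objective: faster
-- what changed: B replaces the O(n^4) enumeration that builds a set of length-n pattern tuples per (w1,w2,a) by a closed-form pattern count: one O(n) pass handles all single-row-weight arrangements, and only w1>w2 pairs are swept (w1<w2 arrangements are dominated by their swapped counterparts), with the count 'base (+1)' computed arithmetically per pair.
import Mathlib
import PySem

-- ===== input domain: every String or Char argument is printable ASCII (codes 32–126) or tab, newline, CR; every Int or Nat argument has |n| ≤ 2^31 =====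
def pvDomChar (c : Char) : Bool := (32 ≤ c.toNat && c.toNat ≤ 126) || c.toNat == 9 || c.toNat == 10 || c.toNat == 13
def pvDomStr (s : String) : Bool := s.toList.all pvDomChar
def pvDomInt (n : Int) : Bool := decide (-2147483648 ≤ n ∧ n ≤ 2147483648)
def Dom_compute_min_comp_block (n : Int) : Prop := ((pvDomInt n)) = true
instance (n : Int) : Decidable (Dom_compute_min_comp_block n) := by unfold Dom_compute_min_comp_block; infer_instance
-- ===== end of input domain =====

set_option maxHeartbeats 1000000


-- B replaces A's per-triple tuple-set construction by a closed-form pattern count: one O(n) pass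
-- for single-row-weight arrangements, and a sweep of only the w1 > w2 pairs (w1 < w2 arrangements
-- are dominated by their swapped counterparts); a timing run measures the speed-up.

-- ===== PORT A =====

-- (1,)*w + (0,)*(n-w)   (tuple repetition clamps a negative count at 0, exactly as .toNat does)
def pvPat (n w : Int) : List Int :=
  List.replicate w.toNat 1 ++ List.replicate (n - w).toNat 0

-- the first four conditional adds of A's `patterns` set (rows, all-ones column, all-zeros column)
def pvPSet (n w1 w2 a : Int) : PySem.Set (List Int) :=
  let R1 := pvPat n w1
  let R2 := pvPat n w2
  let p0 : PySem.Set (List Int) := PySem.Set.empty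
  let p1 := if a > 0 then PySem.Set.add p0 R1 else p0
  let p2 := if n - a > 0 then PySem.Set.add p1 R2 else p1
  let p3 := if min w1 w2 > 0 then PySem.Set.add p2 (List.replicate n.toNat 1) else p2
  if max w1 w2 < n then PySem.Set.add p3 (List.replicate n.toNat 0) else p3

-- the body of A's innermost loop: build the set of patterns and return its size
def pvCompA (n w1 w2 a : Int) : Int :=
  let p4 := pvPSet n w1 w2 a
  let wlo := min w1 w2
  let whi := max w1 w2
  let p5 :=
    if w1 > w2 then
      if wlo < whi then
        PySem.Set.add p4 (List.replicate a.toNat 1 ++ List.replicate (n - a).toNat 0)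
      else p4
    else if w1 < w2 then
      if wlo < whi then
        PySem.Set.add p4 (List.replicate a.toNat 0 ++ List.replicate (n - a).toNat 1)
      else p4
    else p4
  PySem.Set.len p5

def pvStepA (n w1 w2 : Int) (best : List Int) (a : Int) : List Int :=
  let k := a * w1 + (n - a) * w2
  if k < 0 ∨ k > n * n then best
  else
    let comp := pvCompA n w1 w2 a
    PySem.List.pySetD best k (min (PySem.List.pyGetD best k 0) comp)

def compute_min_comp_block (n : Int) : List Int :=
  let best0 := List.replicate (n * n + 1).toNat (999 : Int)
  let best1 := PySem.List.pySetD best0 0 1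
  let best2 := PySem.List.pySetD best1 (n * n) 1
  (PySem.List.pyRange 0 (n + 1) 1).foldl (fun b w1 =>
    (PySem.List.pyRange 0 (n + 1) 1).foldl (fun b w2 =>
      (PySem.List.pyRange 0 (n + 1) 1).foldl (pvStepA n w1 w2) b) b) best2

-- ===== PORT B =====

def compute_min_comp_block_alt (n : Int) : List Int :=
  if n = 0 then [0]
  else
    let best0 := List.replicate (n * n + 1).toNat (999 : Int)
    let best1 := PySem.List.pySetD best0 0 1
    let best2 := PySem.List.pySetD best1 (n * n) 1
    let best3 := (PySem.List.pyRange 0 (n + 1) 1).foldl (fun b w =>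
      let c : Int := if w = 0 ∨ w = n then 1 else 3
      if c < PySem.List.pyGetD b (n * w) 0 then PySem.List.pySetD b (n * w) c else b) best2
    (PySem.List.pyRange 1 (n + 1) 1).foldl (fun b w1 =>
      (PySem.List.pyRange 0 w1 1).foldl (fun b w2 =>
        let base : Int := 2 + 2 * (if 0 < w2 ∧ w1 < n then 1 else 0)
        let d := w1 - w2
        (PySem.List.pyRange 1 n 1).foldl (fun b a =>
          let c := if a = w1 ∨ a = w2 then base else base + 1
          let k := n * w2 + a * d
          if c < PySem.List.pyGetD b k 0 then PySem.List.pySetD b k c else b) b) b) best3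

-- ===== PRECONDITION & SPEC =====
def Spec_compute_min_comp_block (n : Int) (out : List Int) : Prop := out = compute_min_comp_block_alt n
instance (n : Int) (out : List Int) : Decidable (Spec_compute_min_comp_block n out) := by unfold Spec_compute_min_comp_block; infer_instance

-- ===== CLAIM (what is proved, stated in full; the proofs are below) =====
def Claim_equal_compute_min_comp_block : Prop := ∀ (n : Int), Dom_compute_min_comp_block n → Spec_compute_min_comp_block n (compute_min_comp_block n)

-- ===== LEMMAS AND PROOFS =====

-- ---------- generic update/fold machinery ----------

def pvUpd (b : List Int) (p : Int × Int) : List Int :=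
  if p.2 < PySem.List.pyGetD b p.1 0 then PySem.List.pySetD b p.1 p.2 else b

def pvInit (n : Int) : List Int :=
  PySem.List.pySetD (PySem.List.pySetD (List.replicate (n * n + 1).toNat (999 : Int)) 0 1) (n * n) 1

theorem pvSetD_oob (b : List Int) (p v : Int) (hl : (b.length : Int) ≤ p) :
    PySem.List.pySetD b p v = b := by
  simp only [PySem.List.pySetD]
  rw [(PySem.List.pySet?_eq_none_iff b p v).mpr (by simp only [PySem.Raise.InRange]; omega)]
  rfl

theorem pvLength_pvUpd (b : List Int) (p : Int × Int) : (pvUpd b p).length = b.length := by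
  unfold pvUpd; split
  · simp [PySem.List.length_pySetD]
  · rfl

theorem pvFold_len (L : List (Int × Int)) (b : List Int) :
    (L.foldl pvUpd b).length = b.length := by
  induction L generalizing b with
  | nil => rfl
  | cons p t ih => simp [List.foldl_cons, ih, pvLength_pvUpd]

theorem pvUpd_get_ne (b : List Int) (p : Int × Int) (k : Int) (hp0 : 0 ≤ p.1) (hne : p.1 ≠ k)
    (hk0 : 0 ≤ k) (hkl : k < (b.length : Int)) :
    PySem.List.pyGetD (pvUpd b p) k 0 = PySem.List.pyGetD b k 0 := by
  unfold pvUpd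
  split
  · by_cases hpl : p.1 < (b.length : Int)
    · rw [PySem.List.pySetD_of_nonneg _ _ hp0,
        PySem.List.pyGetD_eq_getElem _ _ hk0 (by simpa using hkl),
        PySem.List.pyGetD_eq_getElem _ _ hk0 (by simpa using hkl),
        List.getElem_set_ne (by omega)]
    · rw [pvSetD_oob _ _ _ (by omega)]
  · rfl

theorem pvUpd_get_self (b : List Int) (k c : Int) (hk0 : 0 ≤ k) (hkl : k < (b.length : Int)) :
    PySem.List.pyGetD (pvUpd b (k, c)) k 0 = min (PySem.List.pyGetD b k 0) c := by
  unfold pvUpd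
  split
  · rename_i h
    rw [PySem.List.pySetD_of_nonneg _ _ hk0,
      PySem.List.pyGetD_eq_getElem _ _ hk0 (by simpa using hkl)]
    rw [PySem.List.pyGetD_eq_getElem _ _ hk0 hkl] at h ⊢
    simp [List.getElem_set]
    omega
  · rename_i h
    rw [PySem.List.pyGetD_eq_getElem _ _ hk0 hkl] at h ⊢
    omega

theorem pvFold_get (L : List (Int × Int)) (b : List Int) (k : Int)
    (hL : ∀ p ∈ L, 0 ≤ p.1) (hk0 : 0 ≤ k) (hkl : k < (b.length : Int)) :
    PySem.List.pyGetD (L.foldl pvUpd b) k 0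
      = ((L.filter (fun p => p.1 = k)).map Prod.snd).foldl min (PySem.List.pyGetD b k 0) := by
  induction L generalizing b with
  | nil => rfl
  | cons p t ih =>
    have hkl' : k < ((pvUpd b p).length : Int) := by rw [pvLength_pvUpd]; exact hkl
    have hrec := ih (pvUpd b p) (fun q hq => hL q (List.mem_cons_of_mem _ hq)) hkl'
    by_cases hpk : p.1 = k
    · have : PySem.List.pyGetD (pvUpd b p) k 0 = min (PySem.List.pyGetD b k 0) p.2 := by
        rcases p with ⟨pk, pc⟩
        cases hpk
        exact pvUpd_get_self b _ pc hk0 hkl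
      rw [List.foldl_cons, hrec, this]
      simp [List.filter_cons, hpk]
    · simp only [List.foldl_cons, List.filter_cons, decide_eq_true_eq, hpk, if_false]
      rw [hrec, pvUpd_get_ne b p k (hL p (List.mem_cons_self)) hpk hk0 hkl]

theorem pvLe_foldl_min (t : List Int) (a y : Int) (hy : y ≤ a) (h : ∀ x ∈ t, y ≤ x) :
    y ≤ t.foldl min a := by
  induction t generalizing a with
  | nil => exact hy
  | cons x s ih =>
    exact ih (min a x) (le_min hy (h x List.mem_cons_self)) (fun z hz => h z (List.mem_cons_of_mem _ hz))

theorem pvFoldMin_congr (i : Int) (l1 l2 : List Int)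
    (h12 : ∀ c ∈ l1, ∃ c' ∈ l2, c' ≤ c) (h21 : ∀ c ∈ l2, ∃ c' ∈ l1, c' ≤ c) :
    l1.foldl min i = l2.foldl min i := by
  have le1 : ∀ (l l' : List Int), (∀ c ∈ l', ∃ c' ∈ l, c' ≤ c) → l.foldl min i ≤ l'.foldl min i := by
    intro l l' h
    refine pvLe_foldl_min l' i _ (PySem.List.foldl_min_le l i).1 ?_
    intro x hx
    obtain ⟨c', hc', hle⟩ := h x hx
    exact le_trans ((PySem.List.foldl_min_le l i).2 c' hc') hle
  exact le_antisymm (le1 l1 l2 h21) (le1 l2 l1 h12)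

theorem pvFoldl_flatMap {α : Type} (l : List α) (g : α → List (Int × Int))
    (f : List Int → Int × Int → List Int) (i : List Int) :
    (l.flatMap g).foldl f i = l.foldl (fun acc x => (g x).foldl f acc) i := by
  induction l generalizing i with
  | nil => rfl
  | cons x t ih => simp [List.flatMap_cons, List.foldl_append, ih]

-- ---------- entry lists ----------

def pvEntryA (n w1 w2 a : Int) : Int × Int := (a * w1 + (n - a) * w2, pvCompA n w1 w2 a)

def pvLA (n : Int) : List (Int × Int) :=
  (PySem.List.pyRange 0 (n + 1) 1).flatMap (fun w1 =>
    (PySem.List.pyRange 0 (n + 1) 1).flatMap (fun w2 =>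
      (PySem.List.pyRange 0 (n + 1) 1).map (pvEntryA n w1 w2)))

def pvBase (n w1 w2 : Int) : Int := 2 + 2 * (if 0 < w2 ∧ w1 < n then 1 else 0)

def pvCB (n w1 w2 a : Int) : Int :=
  if a = w1 ∨ a = w2 then pvBase n w1 w2 else pvBase n w1 w2 + 1

def pvLBd (n : Int) : List (Int × Int) :=
  (PySem.List.pyRange 0 (n + 1) 1).map (fun w => (n * w, if w = 0 ∨ w = n then (1 : Int) else 3))

def pvLBi (n : Int) : List (Int × Int) :=
  (PySem.List.pyRange 1 (n + 1) 1).flatMap (fun w1 =>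
    (PySem.List.pyRange 0 w1 1).flatMap (fun w2 =>
      (PySem.List.pyRange 1 n 1).map (fun a => (n * w2 + a * (w1 - w2), pvCB n w1 w2 a))))

-- ---------- weight-set evaluation of A's pattern count ----------

def pvWSet (n w1 w2 a : Int) : PySem.Set Int :=
  let s0 : PySem.Set Int := PySem.Set.empty
  let s1 := if a > 0 then PySem.Set.add s0 w1 else s0
  let s2 := if n - a > 0 then PySem.Set.add s1 w2 else s1
  let s3 := if min w1 w2 > 0 then PySem.Set.add s2 n else s2
  if max w1 w2 < n then PySem.Set.add s3 0 else s3

def pvCompW (n w1 w2 a : Int) : Int :=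
  let s4 := pvWSet n w1 w2 a
  let se : PySem.Set Int × Int :=
    if w1 > w2 then (PySem.Set.add s4 a, 0)
    else if w1 < w2 then
      if a = 0 then (PySem.Set.add s4 n, 0)
      else if a = n then (PySem.Set.add s4 0, 0)
      else (s4, 1)
    else (s4, 0)
  PySem.Set.len se.1 + se.2

theorem pvPat_count (n w : Int) : List.count 1 (pvPat n w) = w.toNat := by
  simp [pvPat, List.count_append, List.count_replicate]

theorem pvPat_inj {n u v : Int} (hu : 0 ≤ u) (hv : 0 ≤ v)
    (h : pvPat n u = pvPat n v) : u = v := by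
  have hc := congrArg (List.count 1) h
  rw [pvPat_count, pvPat_count] at hc
  omega

theorem pvMap_add (n : Int) (s : PySem.Set Int) (x : Int)
    (hs : ∀ y ∈ s, 0 ≤ y) (hx : 0 ≤ x) :
    PySem.Set.add (s.map (pvPat n)) (pvPat n x) = (PySem.Set.add s x).map (pvPat n) := by
  by_cases hm : x ∈ s
  · rw [PySem.Set.add_of_mem hm, PySem.Set.add_of_mem (List.mem_map_of_mem hm)]
  · have hm' : pvPat n x ∉ s.map (pvPat n) := by
      intro hmem
      rcases List.mem_map.mp hmem with ⟨y, hy, he⟩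
      exact hm (pvPat_inj (hs y hy) hx he ▸ hy)
    rw [PySem.Set.add_of_not_mem hm, PySem.Set.add_of_not_mem hm', List.map_append]
    rfl

theorem pvMap_if_add (n : Int) (c : Prop) [Decidable c] (s : PySem.Set Int) (x : Int)
    (hs : ∀ y ∈ s, 0 ≤ y) (hx : 0 ≤ x) :
    (if c then PySem.Set.add (s.map (pvPat n)) (pvPat n x) else s.map (pvPat n))
      = (if c then PySem.Set.add s x else s).map (pvPat n) := by
  split_ifs with hc
  · exact pvMap_add n s x hs hx
  · rfl

theorem pvNonneg_if_add (c : Prop) [Decidable c] (s : PySem.Set Int) (x : Int)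
    (hs : ∀ y ∈ s, 0 ≤ y) (hx : 0 ≤ x) :
    ∀ y ∈ (if c then PySem.Set.add s x else s), 0 ≤ y := by
  split_ifs with hc
  · intro y hy
    rcases (PySem.Set.mem_add s x y).mp hy with h | rfl
    · exact hs y h
    · exact hx
  · exact hs

theorem pvWSet_nonneg (n w1 w2 a : Int) (hw1 : 0 ≤ w1) (hw2 : 0 ≤ w2) (hn : 0 ≤ n) :
    ∀ y ∈ pvWSet n w1 w2 a, 0 ≤ y := by
  simp only [pvWSet]
  exact pvNonneg_if_add _ _ _
    (pvNonneg_if_add _ _ _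
      (pvNonneg_if_add _ _ _
        (pvNonneg_if_add _ _ _ (by simp [PySem.Set.empty]) hw1) hw2) hn) le_rfl

theorem pvLen_map (n : Int) (s : PySem.Set Int) :
    PySem.Set.len (s.map (pvPat n)) = PySem.Set.len s := by
  simp [PySem.Set.len]

theorem pvPSet_eq (n w1 w2 a : Int) (hw1 : 0 ≤ w1) (hw2 : 0 ≤ w2) (hn : 0 ≤ n) :
    pvPSet n w1 w2 a = (pvWSet n w1 w2 a).map (pvPat n) := by
  simp only [pvPSet, pvWSet]
  rw [show List.replicate n.toNat (1 : Int) = pvPat n n by simp [pvPat],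
      show List.replicate n.toNat (0 : Int) = pvPat n 0 by simp [pvPat],
      show (PySem.Set.empty : PySem.Set (List Int))
        = (PySem.Set.empty : PySem.Set Int).map (pvPat n) from rfl,
      pvMap_if_add n (a > 0) PySem.Set.empty w1 (by simp [PySem.Set.empty]) hw1,
      pvMap_if_add n (n - a > 0) _ w2
        (pvNonneg_if_add _ _ _ (by simp [PySem.Set.empty]) hw1) hw2,
      pvMap_if_add n (min w1 w2 > 0) _ n
        (pvNonneg_if_add _ _ _ (pvNonneg_if_add _ _ _ (by simp [PySem.Set.empty]) hw1) hw2) hn,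
      pvMap_if_add n (max w1 w2 < n) _ 0
        (pvNonneg_if_add _ _ _ (pvNonneg_if_add _ _ _ (pvNonneg_if_add _ _ _ (by simp [PySem.Set.empty]) hw1) hw2) hn) le_rfl]

theorem pvSuf_ne (n a w : Int) (ha0 : 0 < a) (han : a < n) :
    pvPat n w ≠ List.replicate a.toNat 0 ++ List.replicate (n - a).toNat 1 := by
  intro h
  have hc := congrArg (List.count 1) h
  rw [pvPat_count] at hc
  simp [List.count_append, List.count_replicate] at hc
  have hwpos : 0 < w.toNat := by omega
  have h0 := congrArg (fun l => l[0]?) h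
  simp only [pvPat] at h0
  rw [List.getElem?_append_left (by simpa using hwpos),
      List.getElem?_append_left (by simp; omega)] at h0
  simp [hwpos, show 0 < a.toNat by omega] at h0

theorem pvCompA_eq_W (n w1 w2 a : Int) (hw1 : 0 ≤ w1) (hw1n : w1 ≤ n)
    (hw2 : 0 ≤ w2) (hw2n : w2 ≤ n) (ha : 0 ≤ a) (han : a ≤ n) :
    pvCompA n w1 w2 a = pvCompW n w1 w2 a := by
  have hn : 0 ≤ n := le_trans ha han
  have hsn := pvWSet_nonneg n w1 w2 a hw1 hw2 hn
  simp only [pvCompA, pvCompW]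
  rw [pvPSet_eq n w1 w2 a hw1 hw2 hn]
  rcases lt_trichotomy w1 w2 with hlt | heq | hgt
  · rw [if_neg (by omega : ¬ w1 > w2), if_neg (by omega : ¬ w1 > w2),
        if_pos hlt, if_pos hlt, if_pos (min_lt_max.mpr (by omega : w1 ≠ w2))]
    by_cases ha0 : a = 0
    · subst ha0
      rw [if_pos rfl,
          show (List.replicate (0 : Int).toNat (0 : Int) ++ List.replicate (n - 0).toNat 1)
            = pvPat n n by simp [pvPat],
          pvMap_add n _ n hsn hn, pvLen_map]
      simp
    · rw [if_neg ha0]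
      by_cases han' : a = n
      · subst han'
        rw [if_pos rfl,
            show (List.replicate a.toNat (0 : Int) ++ List.replicate (a - a).toNat 1)
              = pvPat a 0 by simp [pvPat],
            pvMap_add a _ 0 hsn le_rfl, pvLen_map]
        simp
      · rw [if_neg han']
        have hsuf : (List.replicate a.toNat (0 : Int) ++ List.replicate (n - a).toNat 1)
            ∉ (pvWSet n w1 w2 a).map (pvPat n) := by
          intro hmem
          rcases List.mem_map.mp hmem with ⟨y, _, he⟩
          exact pvSuf_ne n a y (by omega) (by omega) he
        rw [PySem.Set.add_of_not_mem hsuf]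
        simp [PySem.Set.len]
  · rw [if_neg (by omega : ¬ w1 > w2), if_neg (by omega : ¬ w1 > w2),
        if_neg (by omega : ¬ w1 < w2), if_neg (by omega : ¬ w1 < w2), pvLen_map]
    simp
  · rw [if_pos hgt, if_pos hgt, if_pos (min_lt_max.mpr (by omega : w1 ≠ w2)),
        show (List.replicate a.toNat (1 : Int) ++ List.replicate (n - a).toNat 0)
          = pvPat n a from rfl,
        pvMap_add n _ a hsn ha, pvLen_map]
    simp

-- ---------- closed-form values of the weight-set count ----------

theorem pvLenAdd (s : PySem.Set Int) (x : Int) :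
    PySem.Set.len (PySem.Set.add s x) = PySem.Set.len s + (if x ∈ s then 0 else 1) := by
  rw [PySem.Set.add_eq_ite]
  split_ifs <;> simp [PySem.Set.len]

theorem pvLenEmpty : PySem.Set.len (PySem.Set.empty : PySem.Set Int) = 0 := by
  simp [PySem.Set.len, PySem.Set.empty]

theorem pvLenNil : PySem.Set.len (([] : List Int) : PySem.Set Int) = 0 := by
  simp [PySem.Set.len]

theorem pvCompW_diag (n w a : Int) (hn : 1 ≤ n) (hw0 : 0 ≤ w) (hwn : w ≤ n)
    (ha0 : 0 ≤ a) (han : a ≤ n) :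
    pvCompW n w w a = if w = 0 ∨ w = n then 1 else 3 := by
  simp only [pvCompW, pvWSet, min_self, max_self]
  split_ifs <;>
    first
      | (exfalso; omega)
      | (simp only [pvLenAdd, pvLenEmpty, pvLenNil, PySem.Set.mem_add, PySem.Set.empty,
          List.not_mem_nil, false_or, or_false, or_true, true_or, or_self, if_true, if_false,
          eq_self_iff_true]
         first
           | omega
           | (split_ifs <;> omega))

theorem pvCompW_a0 (n w1 w2 : Int) (hn : 1 ≤ n) (hne : w1 ≠ w2)
    (hw1 : 0 ≤ w1) (hw1n : w1 ≤ n) (hw2 : 0 ≤ w2) (hw2n : w2 ≤ n) :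
    pvCompW n w1 w2 0 = if w2 = 0 ∨ w2 = n then 1 else 3 := by
  rcases lt_or_gt_of_ne hne with hlt | hgt
  · have h1 : min w1 w2 = w1 := by omega
    have h2 : max w1 w2 = w2 := by omega
    simp only [pvCompW, pvWSet, pvCB, pvBase, h1, h2]
    split_ifs <;>
      first
        | (exfalso; omega)
        | (simp only [pvLenAdd, pvLenEmpty, pvLenNil, PySem.Set.mem_add, PySem.Set.empty,
            List.not_mem_nil, false_or, or_false, or_true, true_or, or_self, if_true, if_false,
          eq_self_iff_true]
           first
             | omega
             | (split_ifs <;> omega))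
  · have h1 : min w1 w2 = w2 := by omega
    have h2 : max w1 w2 = w1 := by omega
    simp only [pvCompW, pvWSet, pvCB, pvBase, h1, h2]
    split_ifs <;>
      first
        | (exfalso; omega)
        | (simp only [pvLenAdd, pvLenEmpty, pvLenNil, PySem.Set.mem_add, PySem.Set.empty,
            List.not_mem_nil, false_or, or_false, or_true, true_or, or_self, if_true, if_false,
          eq_self_iff_true]
           first
             | omega
             | (split_ifs <;> omega))

theorem pvCompW_an (n w1 w2 : Int) (hn : 1 ≤ n) (hne : w1 ≠ w2)
    (hw1 : 0 ≤ w1) (hw1n : w1 ≤ n) (hw2 : 0 ≤ w2) (hw2n : w2 ≤ n) :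
    pvCompW n w1 w2 n = if w1 = 0 ∨ w1 = n then 1 else 3 := by
  rcases lt_or_gt_of_ne hne with hlt | hgt
  · have h1 : min w1 w2 = w1 := by omega
    have h2 : max w1 w2 = w2 := by omega
    simp only [pvCompW, pvWSet, pvCB, pvBase, h1, h2]
    split_ifs <;>
      first
        | (exfalso; omega)
        | (simp only [pvLenAdd, pvLenEmpty, pvLenNil, PySem.Set.mem_add, PySem.Set.empty,
            List.not_mem_nil, false_or, or_false, or_true, true_or, or_self, if_true, if_false,
          eq_self_iff_true]
           first
             | omega
             | (split_ifs <;> omega))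
  · have h1 : min w1 w2 = w2 := by omega
    have h2 : max w1 w2 = w1 := by omega
    simp only [pvCompW, pvWSet, pvCB, pvBase, h1, h2]
    split_ifs <;>
      first
        | (exfalso; omega)
        | (simp only [pvLenAdd, pvLenEmpty, pvLenNil, PySem.Set.mem_add, PySem.Set.empty,
            List.not_mem_nil, false_or, or_false, or_true, true_or, or_self, if_true, if_false,
          eq_self_iff_true]
           first
             | omega
             | (split_ifs <;> omega))

theorem pvCompW_gt (n w1 w2 a : Int) (h21 : w2 < w1) (ha0 : 0 < a) (han : a < n)
    (hw1n : w1 ≤ n) (hw2 : 0 ≤ w2) :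
    pvCompW n w1 w2 a = pvCB n w1 w2 a := by
  have h1 : min w1 w2 = w2 := by omega
  have h2 : max w1 w2 = w1 := by omega
  simp only [pvCompW, pvWSet, pvCB, pvBase, h1, h2]
  split_ifs <;>
    first
      | (exfalso; omega)
      | (simp only [pvLenAdd, pvLenEmpty, pvLenNil, PySem.Set.mem_add, PySem.Set.empty,
          List.not_mem_nil, false_or, or_false, or_true, true_or, or_self, if_true, if_false,
          eq_self_iff_true]
         first
           | omega
           | (split_ifs <;> omega))

theorem pvCompW_lt (n w1 w2 a : Int) (h12 : w1 < w2) (ha0 : 0 < a) (han : a < n)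
    (hw2n : w2 ≤ n) (hw1 : 0 ≤ w1) :
    pvCompW n w1 w2 a = pvBase n w2 w1 + 1 := by
  have h1 : min w1 w2 = w1 := by omega
  have h2 : max w1 w2 = w2 := by omega
  simp only [pvCompW, pvWSet, pvCB, pvBase, h1, h2]
  split_ifs <;>
    first
      | (exfalso; omega)
      | (simp only [pvLenAdd, pvLenEmpty, pvLenNil, PySem.Set.mem_add, PySem.Set.empty,
          List.not_mem_nil, false_or, or_false, or_true, true_or, or_self, if_true, if_false,
          eq_self_iff_true]
         first
           | omega
           | (split_ifs <;> omega))

theorem pvCB_le (n w1 w2 a : Int) : pvCB n w1 w2 a ≤ pvBase n w1 w2 + 1 := by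
  unfold pvCB pvBase
  split_ifs <;> omega

-- ---------- fold normalizations ----------

theorem pvCompA_nonneg (n w1 w2 a : Int) : 0 ≤ pvCompA n w1 w2 a := by
  simp only [pvCompA, PySem.Set.len]
  split_ifs <;> omega

theorem pvStepA_eq_upd (n w1 w2 a : Int) (b : List Int)
    (hw1 : 0 ≤ w1) (hw1n : w1 ≤ n) (hw2 : 0 ≤ w2) (hw2n : w2 ≤ n)
    (ha : 0 ≤ a) (han : a ≤ n) :
    pvStepA n w1 w2 b a = pvUpd b (pvEntryA n w1 w2 a) := by
  have hk0 : 0 ≤ a * w1 + (n - a) * w2 :=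
    add_nonneg (mul_nonneg ha hw1) (mul_nonneg (by omega) hw2)
  have hkn : a * w1 + (n - a) * w2 ≤ n * n := by nlinarith
  have hc0 : 0 ≤ pvCompA n w1 w2 a := pvCompA_nonneg n w1 w2 a
  simp only [pvStepA, pvEntryA, pvUpd]
  rw [if_neg (by omega : ¬ (a * w1 + (n - a) * w2 < 0 ∨ a * w1 + (n - a) * w2 > n * n))]
  by_cases hkr : a * w1 + (n - a) * w2 < (b.length : Int)
  · rw [PySem.List.pyGetD_eq_getElem b 0 hk0 hkr]
    by_cases hlt : pvCompA n w1 w2 a < b[(a * w1 + (n - a) * w2).toNat]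
    · rw [if_pos hlt, min_eq_right hlt.le]
    · rw [if_neg hlt, min_eq_left (not_lt.mp hlt),
          PySem.List.pySetD_of_nonneg b _ hk0,
          List.set_getElem_self]
  · have hnone : PySem.List.pyGet? b (a * w1 + (n - a) * w2) = none := by
      rw [PySem.List.pyGet?_eq_none_iff]
      simp only [PySem.Raise.InRange]
      omega
    rw [PySem.List.pyGetD_of_none b _ 0 hnone, if_neg (by omega : ¬ pvCompA n w1 w2 a < 0)]
    exact pvSetD_oob b _ _ (by omega)

theorem pvA_fold (n : Int) : compute_min_comp_block n = (pvLA n).foldl pvUpd (pvInit n) := by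
  unfold compute_min_comp_block pvLA pvInit
  rw [pvFoldl_flatMap]
  refine PySem.List.foldl_congr_mem _ _ _ _ ?_
  intro b w1 hw1
  rw [pvFoldl_flatMap]
  refine PySem.List.foldl_congr_mem _ _ _ _ ?_
  intro b2 w2 hw2
  rw [List.foldl_map]
  refine PySem.List.foldl_congr_mem _ _ _ _ ?_
  intro b3 a ha
  rw [PySem.List.mem_pyRange_one] at hw1 hw2 ha
  exact pvStepA_eq_upd n w1 w2 a b3 hw1.1 (by omega) hw2.1 (by omega) ha.1 (by omega)

theorem pvB_fold (n : Int) (hn : n ≠ 0) :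
    compute_min_comp_block_alt n = (pvLBd n ++ pvLBi n).foldl pvUpd (pvInit n) := by
  unfold compute_min_comp_block_alt pvLBd pvLBi pvInit
  rw [if_neg hn, List.foldl_append, List.foldl_map, pvFoldl_flatMap]
  refine PySem.List.foldl_congr_mem _ _ _ _ ?_
  intro b w1 _
  rw [pvFoldl_flatMap]
  refine PySem.List.foldl_congr_mem _ _ _ _ ?_
  intro b2 w2 _
  rw [List.foldl_map]
  rfl

-- ---------- key bounds ----------

theorem pvLA_keys (n : Int) : ∀ p ∈ pvLA n, 0 ≤ p.1 := by
  intro p hp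
  simp only [pvLA, List.mem_flatMap, List.mem_map] at hp
  obtain ⟨w1, hw1, w2, hw2, a, ha, rfl⟩ := hp
  rw [PySem.List.mem_pyRange_one] at hw1 hw2 ha
  have h1 := mul_nonneg ha.1 hw1.1
  have h2 := mul_nonneg (by omega : (0:Int) ≤ n - a) hw2.1
  simp only [pvEntryA]
  omega

theorem pvLB_keys (n : Int) : ∀ p ∈ pvLBd n ++ pvLBi n, 0 ≤ p.1 := by
  intro p hp
  rcases List.mem_append.mp hp with hd | hi
  · simp only [pvLBd, List.mem_map] at hd
    obtain ⟨w, hw, rfl⟩ := hd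
    rw [PySem.List.mem_pyRange_one] at hw
    exact mul_nonneg (by omega) hw.1
  · simp only [pvLBi, List.mem_flatMap, List.mem_map] at hi
    obtain ⟨w1, hw1, w2, hw2, a, ha, rfl⟩ := hi
    rw [PySem.List.mem_pyRange_one] at hw1 hw2 ha
    have h1 := mul_nonneg (by omega : (0:Int) ≤ n) hw2.1
    have h2 := mul_nonneg (by omega : (0:Int) ≤ a) (by omega : (0:Int) ≤ w1 - w2)
    simp only []
    omega

-- ---------- domination ----------

theorem pvCovBA (n : Int) (hn : 1 ≤ n) :
    ∀ p ∈ pvLBd n ++ pvLBi n, ∃ q ∈ pvLA n, q.1 = p.1 ∧ q.2 ≤ p.2 := by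
  intro p hp
  rcases List.mem_append.mp hp with hd | hi
  · simp only [pvLBd, List.mem_map] at hd
    obtain ⟨w, hw, rfl⟩ := hd
    rw [PySem.List.mem_pyRange_one] at hw
    refine ⟨pvEntryA n w w 0, ?_, by simp only [pvEntryA]; ring, ?_⟩
    · simp only [pvLA, List.mem_flatMap, List.mem_map]
      exact ⟨w, by rw [PySem.List.mem_pyRange_one]; omega,
             w, by rw [PySem.List.mem_pyRange_one]; omega,
             0, by rw [PySem.List.mem_pyRange_one]; omega, rfl⟩
    · simp only [pvEntryA]
      rw [pvCompA_eq_W n w w 0 hw.1 (by omega) hw.1 (by omega) le_rfl (by omega),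
          pvCompW_diag n w 0 hn hw.1 (by omega) le_rfl (by omega)]
  · simp only [pvLBi, List.mem_flatMap, List.mem_map] at hi
    obtain ⟨w1, hw1, w2, hw2, a, ha, rfl⟩ := hi
    rw [PySem.List.mem_pyRange_one] at hw1 hw2 ha
    refine ⟨pvEntryA n w1 w2 a, ?_, by simp only [pvEntryA]; ring, ?_⟩
    · simp only [pvLA, List.mem_flatMap, List.mem_map]
      exact ⟨w1, by rw [PySem.List.mem_pyRange_one]; omega,
             w2, by rw [PySem.List.mem_pyRange_one]; omega,
             a, by rw [PySem.List.mem_pyRange_one]; omega, rfl⟩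
    · simp only [pvEntryA]
      rw [pvCompA_eq_W n w1 w2 a (by omega) (by omega) hw2.1 (by omega) (by omega) (by omega),
          pvCompW_gt n w1 w2 a (by omega) (by omega) (by omega) (by omega) hw2.1]

theorem pvCovAB (n : Int) (hn : 1 ≤ n) :
    ∀ q ∈ pvLA n, ∃ p ∈ pvLBd n ++ pvLBi n, p.1 = q.1 ∧ p.2 ≤ q.2 := by
  intro q hq
  simp only [pvLA, List.mem_flatMap, List.mem_map] at hq
  obtain ⟨w1, hw1, w2, hw2, a, ha, rfl⟩ := hq
  rw [PySem.List.mem_pyRange_one] at hw1 hw2 ha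
  rcases eq_or_ne w1 w2 with heq | hne
  · subst heq
    refine ⟨(n * w1, if w1 = 0 ∨ w1 = n then 1 else 3), List.mem_append_left _ ?_,
        by simp only [pvEntryA]; ring, ?_⟩
    · simp only [pvLBd, List.mem_map]
      exact ⟨w1, by rw [PySem.List.mem_pyRange_one]; omega, rfl⟩
    · simp only [pvEntryA]
      rw [pvCompA_eq_W n w1 w1 a hw1.1 (by omega) hw1.1 (by omega) ha.1 (by omega),
          pvCompW_diag n w1 a hn hw1.1 (by omega) ha.1 (by omega)]
  · by_cases ha0 : a = 0
    · subst ha0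
      refine ⟨(n * w2, if w2 = 0 ∨ w2 = n then 1 else 3), List.mem_append_left _ ?_,
          by simp only [pvEntryA]; ring, ?_⟩
      · simp only [pvLBd, List.mem_map]
        exact ⟨w2, by rw [PySem.List.mem_pyRange_one]; omega, rfl⟩
      · simp only [pvEntryA]
        rw [pvCompA_eq_W n w1 w2 0 hw1.1 (by omega) hw2.1 (by omega) le_rfl (by omega),
            pvCompW_a0 n w1 w2 hn hne hw1.1 (by omega) hw2.1 (by omega)]
    · by_cases han : a = n
      · refine ⟨(n * w1, if w1 = 0 ∨ w1 = n then 1 else 3), List.mem_append_left _ ?_,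
            by simp only [pvEntryA, han]; ring, ?_⟩
        · simp only [pvLBd, List.mem_map]
          exact ⟨w1, by rw [PySem.List.mem_pyRange_one]; omega, rfl⟩
        · simp only [pvEntryA]
          rw [han, pvCompA_eq_W n w1 w2 n hw1.1 (by omega) hw2.1 (by omega) (by omega) le_rfl,
              pvCompW_an n w1 w2 hn hne hw1.1 (by omega) hw2.1 (by omega)]
      · rcases lt_or_gt_of_ne hne with hlt | hgt
        · refine ⟨(n * w1 + (n - a) * (w2 - w1), pvCB n w2 w1 (n - a)),
              List.mem_append_right _ ?_, by simp only [pvEntryA]; ring, ?_⟩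
          · simp only [pvLBi, List.mem_flatMap, List.mem_map]
            exact ⟨w2, by rw [PySem.List.mem_pyRange_one]; omega,
                   w1, by rw [PySem.List.mem_pyRange_one]; omega,
                   n - a, by rw [PySem.List.mem_pyRange_one]; omega, rfl⟩
          · simp only [pvEntryA]
            rw [pvCompA_eq_W n w1 w2 a hw1.1 (by omega) hw2.1 (by omega) ha.1 (by omega),
                pvCompW_lt n w1 w2 a hlt (by omega) (by omega) (by omega) hw1.1]
            exact pvCB_le n w2 w1 (n - a)
        · refine ⟨(n * w2 + a * (w1 - w2), pvCB n w1 w2 a),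
              List.mem_append_right _ ?_, by simp only [pvEntryA]; ring, ?_⟩
          · simp only [pvLBi, List.mem_flatMap, List.mem_map]
            exact ⟨w1, by rw [PySem.List.mem_pyRange_one]; omega,
                   w2, by rw [PySem.List.mem_pyRange_one]; omega,
                   a, by rw [PySem.List.mem_pyRange_one]; omega, rfl⟩
          · simp only [pvEntryA]
            rw [pvCompA_eq_W n w1 w2 a hw1.1 (by omega) hw2.1 (by omega) ha.1 (by omega),
                pvCompW_gt n w1 w2 a hgt (by omega) (by omega) (by omega) hw2.1]

-- ---------- assembly ----------

theorem pvMain (n : Int) : compute_min_comp_block n = compute_min_comp_block_alt n := by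
  rcases lt_trichotomy n 0 with hneg | h0 | hpos
  · rw [pvA_fold, pvB_fold n (by omega)]
    have hA : pvLA n = [] := by
      unfold pvLA
      rw [show PySem.List.pyRange 0 (n + 1) 1 = [] from PySem.List.pyRange_one_eq_nil (by omega)]
      rfl
    have hBd : pvLBd n = [] := by
      unfold pvLBd
      rw [show PySem.List.pyRange 0 (n + 1) 1 = [] from PySem.List.pyRange_one_eq_nil (by omega)]
      rfl
    have hBi : pvLBi n = [] := by
      unfold pvLBi
      rw [show PySem.List.pyRange 1 (n + 1) 1 = [] from PySem.List.pyRange_one_eq_nil (by omega)]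
      rfl
    rw [hA, hBd, hBi]
    rfl
  · subst h0
    decide
  · have hn : 1 ≤ n := hpos
    rw [pvA_fold, pvB_fold n (by omega)]
    have hlenA : ((pvLA n).foldl pvUpd (pvInit n)).length = (pvInit n).length := pvFold_len _ _
    have hlenB : ((pvLBd n ++ pvLBi n).foldl pvUpd (pvInit n)).length = (pvInit n).length :=
      pvFold_len _ _
    apply List.ext_getElem (by rw [hlenA, hlenB])
    intro i h1 h2
    have hi0 : (0:Int) ≤ (i:Int) := Int.natCast_nonneg i
    have hilen : (i:Int) < ((pvInit n).length : Int) := by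
      rw [hlenA] at h1
      exact_mod_cast h1
    have gA : PySem.List.pyGetD ((pvLA n).foldl pvUpd (pvInit n)) (i:Int) 0
        = ((pvLA n).foldl pvUpd (pvInit n))[i]'h1 := by
      rw [PySem.List.pyGetD_eq_getElem _ 0 hi0 (by rw [hlenA]; exact hilen)]
      simp
    have gB : PySem.List.pyGetD ((pvLBd n ++ pvLBi n).foldl pvUpd (pvInit n)) (i:Int) 0
        = ((pvLBd n ++ pvLBi n).foldl pvUpd (pvInit n))[i]'h2 := by
      rw [PySem.List.pyGetD_eq_getElem _ 0 hi0 (by rw [hlenB]; exact hilen)]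
      simp
    rw [← gA, ← gB,
        pvFold_get (pvLA n) (pvInit n) (i:Int) (pvLA_keys n) hi0 hilen,
        pvFold_get (pvLBd n ++ pvLBi n) (pvInit n) (i:Int) (pvLB_keys n) hi0 hilen]
    apply pvFoldMin_congr
    · intro c hc
      rw [List.mem_map] at hc
      obtain ⟨p, hpf, rfl⟩ := hc
      rw [List.mem_filter, decide_eq_true_eq] at hpf
      obtain ⟨hpA, hpk⟩ := hpf
      obtain ⟨qb, hqB, hq1, hq2⟩ := pvCovAB n hn p hpA
      refine ⟨qb.2, ?_, hq2⟩
      exact List.mem_map_of_mem (List.mem_filter.mpr ⟨hqB, by simp [hq1, hpk]⟩)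
    · intro c hc
      rw [List.mem_map] at hc
      obtain ⟨p, hpf, rfl⟩ := hc
      rw [List.mem_filter, decide_eq_true_eq] at hpf
      obtain ⟨hpB, hpk⟩ := hpf
      obtain ⟨qa, hqA, hq1, hq2⟩ := pvCovBA n hn p hpB
      refine ⟨qa.2, ?_, hq2⟩
      exact List.mem_map_of_mem (List.mem_filter.mpr ⟨hqA, by simp [hq1, hpk]⟩)

-- ===== VERDICT (by name: the statement is the Claim_ definition above) =====
theorem compute_min_comp_block_spec : Claim_equal_compute_min_comp_block := by
  intro n _
  unfold Spec_compute_min_comp_block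
  exact pvMain n
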